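-- pv_equiv track=rewrite | github.com/brandonello/mini_gestor_peajes | funciones.py | mayus_en_palabras
-- ===== SOURCE A (Python) =====
-- def mayus_en_palabras(cadena):
--     cmayus = 0
--     newword_ok = True
--     for caracter in cadena:
--         if caracter in '. ':
--             newword_ok = True
--         else:
--             if 'A' <= caracter <= 'Z':
--                 if newword_ok:
--                     cmayus += 1
--                     newword_ok = False
--     return cmayus
-- ===== SOURCE B (Python) =====
-- def mayus_en_palabras(cadena):
--     # Normalise both delimiters to ' ', split into tokens (keeping empties),
--     # and count the tokens that contain at least one ASCII uppercase letter.
--     tokens = cadena.replace('.', ' ').split(' ')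
--     count = 0
--     for palabra in tokens:
--         if any('A' <= c <= 'Z' for c in palabra):
--             count += 1
--     return count
-- ===== Notes on version B (the rewrite author's own statement) =====
-- stated objective: simpler
-- what changed: Replaces the character-level flag automaton with a two-step pipeline: normalise '.' to ' ', split into delimiter-separated tokens, and count tokens containing an ASCII uppercase letter.
import Mathlib
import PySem

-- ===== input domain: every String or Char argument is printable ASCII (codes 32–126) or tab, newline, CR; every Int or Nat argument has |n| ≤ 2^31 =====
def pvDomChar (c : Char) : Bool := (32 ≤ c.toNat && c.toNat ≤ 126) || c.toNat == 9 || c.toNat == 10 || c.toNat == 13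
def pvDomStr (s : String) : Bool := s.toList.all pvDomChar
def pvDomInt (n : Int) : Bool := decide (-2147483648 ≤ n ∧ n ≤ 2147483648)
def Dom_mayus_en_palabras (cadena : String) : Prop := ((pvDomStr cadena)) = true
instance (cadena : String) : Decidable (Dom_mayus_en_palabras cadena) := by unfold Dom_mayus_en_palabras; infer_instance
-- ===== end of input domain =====

-- B replaces A's character-level flag automaton with normalise-then-split-then-count over tokens (simpler decomposition; same O(n) cost).


-- ===== PORT A =====
-- loop body of A: 'caracter in ". "' on a single character is exactly membership in {'.', ' '}
def pyStepA (st : Int × Bool) (caracter : Char) : Int × Bool :=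
  if caracter = '.' || caracter = ' ' then (st.1, true)
  else if 'A' ≤ caracter && caracter ≤ 'Z' then
    (if st.2 then (st.1 + 1, false) else st)
  else st

def mayus_en_palabras (cadena : String) : Int :=
  (cadena.toList.foldl pyStepA ((0 : Int), true)).1

-- ===== PORT B =====
def mayus_en_palabras_alt (cadena : String) : Int :=
  (((PySem.Str.split? (PySem.Str.replace cadena "." " ") " ").getD []).foldl
    (fun count palabra =>
      if palabra.toList.any (fun c => 'A' ≤ c && c ≤ 'Z') then count + 1 else count) 0)

-- ===== PRECONDITION & SPEC =====
def Spec_mayus_en_palabras (cadena : String) (out : Int) : Prop := out = mayus_en_palabras_alt cadena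
instance (cadena : String) (out : Int) : Decidable (Spec_mayus_en_palabras cadena out) := by unfold Spec_mayus_en_palabras; infer_instance

-- ===== CLAIM (what is proved, stated in full; the proofs are below) =====
def Claim_equal_mayus_en_palabras : Prop := ∀ (cadena : String), Dom_mayus_en_palabras cadena → Spec_mayus_en_palabras cadena (mayus_en_palabras cadena)

-- ===== LEMMAS AND PROOFS =====

-- A's loop as a Nat-valued recursion on the character list, flag as argument
def loopA : Bool → List Char → Nat
  | _, [] => 0
  | b, c :: t =>
    if c = '.' || c = ' ' then loopA true t
    else if ('A' ≤ c && c ≤ 'Z') && b then 1 + loopA false t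
    else loopA b t

def delimToSpace (c : Char) : Char := if c = '.' then ' ' else c

def hasUp (cs : List Char) : Bool := cs.any (fun c => 'A' ≤ c && c ≤ 'Z')

-- reference recursion for splitting on ' ' with a reversed current-token accumulator
def split1 : List Char → List Char → List (List Char)
  | cur, [] => [cur.reverse]
  | cur, c :: t => if c = ' ' then cur.reverse :: split1 [] t else split1 (c :: cur) t

theorem foldA (s : List Char) : ∀ (k : Int) (b : Bool),
    (s.foldl pyStepA (k, b)).1 = k + (loopA b s : Nat) := by
  induction s with
  | nil => intro k b; simp [loopA]
  | cons c t ih =>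
    intro k b
    simp only [List.foldl_cons, pyStepA, loopA]
    by_cases h1 : c = '.' || c = ' '
    · simp [h1, ih]
    · simp only [h1, if_false]
      by_cases h2 : ('A' ≤ c && c ≤ 'Z') = true
      · cases b with
        | true => simp [h2, ih]; push_cast; ring
        | false => simp [h2, ih]
      
      · simp [h2, ih]

theorem replaceGo (l : List Char) : ∀ (fuel : Nat) (acc : List Char), l.length ≤ fuel →
    PySem.Chars.replace.go ['.'] [' '] fuel l acc = acc.reverse ++ l.map delimToSpace := by
  induction l with
  | nil =>
    intro fuel acc _
    cases fuel <;> simp [PySem.Chars.replace.go]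
  | cons c t ih =>
    intro fuel acc h
    cases fuel with
    | zero => simp at h
    | succ n =>
      simp only [PySem.Chars.replace.go]
      by_cases hc : c = '.'
      · subst hc
        simp [List.isPrefixOf, ih n _ (by simpa using h), delimToSpace]
      · have : ['.'].isPrefixOf (c :: t) = false := by
          simp [List.isPrefixOf]; exact fun h => absurd h.symm hc
        simp [this, ih n _ (by simpa using h), delimToSpace, hc]

theorem replaceEq (s : List Char) :
    PySem.Chars.replace s ['.'] [' '] = s.map delimToSpace := by
  simp [PySem.Chars.replace, replaceGo s s.length [] le_rfl]

theorem splitGo (l : List Char) : ∀ (fuel : Nat) (cur : List Char) (acc : List (List Char)), l.length < fuel →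
    PySem.Chars.splitOn.go [' '] fuel l cur acc = acc.reverse ++ split1 cur l := by
  induction l with
  | nil =>
    intro fuel cur acc h
    cases fuel with
    | zero => simp at h
    | succ n => simp [PySem.Chars.splitOn.go, split1]
  | cons c t ih =>
    intro fuel cur acc h
    cases fuel with
    | zero => simp at h
    | succ n =>
      simp only [PySem.Chars.splitOn.go]
      by_cases hc : c = ' '
      · subst hc
        simp [List.isPrefixOf, ih n [] _ (by simpa using h), split1]
      · have : [' '].isPrefixOf (c :: t) = false := by
          simp [List.isPrefixOf]; exact fun h => absurd h.symm hc
        simp [this, ih n (c :: cur) acc (by simpa using h), split1, hc]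

theorem splitOnEq (s : List Char) :
    PySem.Chars.splitOn s [' '] = split1 [] s := by
  simpa using splitGo s (s.length + 1) [] [] (Nat.lt_succ_self _)

theorem foldl_count {α : Type} (p : α → Bool) (ts : List α) : ∀ (k : Int),
    ts.foldl (fun acc w => if p w then acc + 1 else acc) k = k + (ts.countP p : Nat) := by
  induction ts with
  | nil => intro k; simp
  | cons w t ih =>
    intro k
    by_cases hw : p w = true <;>
      simp [List.countP_cons, hw, ih] <;> push_cast <;> ring

theorem split_countP (s : List Char) : ∀ (cur : List Char),
    (split1 cur (s.map delimToSpace)).countP hasUp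
      = if hasUp cur then 1 + loopA false s else loopA true s := by
  induction s with
  | nil =>
    intro cur
    simp only [List.map_nil, split1, loopA, List.countP_cons, List.countP_nil, hasUp,
      List.any_reverse]
    by_cases h : cur.any (fun c => 'A' ≤ c && c ≤ 'Z') = true <;> simp [h]
  | cons c t ih =>
    intro cur
    by_cases hd : c = '.' || c = ' '
    · have hf : delimToSpace c = ' ' := by
        rcases Bool.or_eq_true_iff.mp hd with h | h <;>
          simp_all [delimToSpace]
      simp only [List.map_cons, hf, split1, if_pos rfl, List.countP_cons, loopA, hd, if_true]
      have := ih []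
      simp only [hasUp, List.any_nil, if_neg Bool.false_ne_true] at this
      rw [this]
      by_cases h : hasUp cur = true
      · have : hasUp cur.reverse = true := by simpa [hasUp] using h
        simp [h, this, Nat.add_comm]
      · have : hasUp cur.reverse = false := by
          simp only [Bool.not_eq_true] at h; simpa [hasUp] using h
        simp [h, this]
    · have hf : delimToSpace c = c := by
        simp only [Bool.or_eq_true_iff, not_or] at hd
        have : ¬ (c = '.') := by simpa using hd.1
        simp [delimToSpace, this]
      have hne : ¬ (c = ' ') := by
        simp only [Bool.or_eq_true_iff, not_or] at hd; exact fun h => hd.2 (by simp [h])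
      simp only [List.map_cons, hf, split1, if_neg hne, loopA, hd, if_false]
      rw [ih (c :: cur)]
      by_cases hb : hasUp cur = true
      · have : hasUp (c :: cur) = true := by simp [hasUp] at hb ⊢; right; exact hb
        simp only [this, hb, if_true]
        by_cases hu : ('A' ≤ c && c ≤ 'Z') = true <;> simp [hu, loopA]
      · simp only [Bool.not_eq_true] at hb
        by_cases hu : ('A' ≤ c && c ≤ 'Z') = true
        · have : hasUp (c :: cur) = true := by simp [hasUp, hu]
          simp [this, hb, hu]
        · have : hasUp (c :: cur) = false := by
            simp only [Bool.not_eq_true] at hu; simp [hasUp, hu]; simpa [hasUp] using hb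
          simp [this, hb, hu]

-- ===== VERDICT (by name: the statement is the Claim_ definition above) =====
theorem mayus_en_palabras_spec : Claim_equal_mayus_en_palabras := by
  intro cadena _
  unfold Spec_mayus_en_palabras mayus_en_palabras mayus_en_palabras_alt
  rw [foldA]
  have hrepl : (PySem.Str.replace cadena "." " ").toList
      = cadena.toList.map delimToSpace := by
    rw [PySem.Str.toList_replace]
    simpa using replaceEq cadena.toList
  have hsplit : PySem.Str.split? (PySem.Str.replace cadena "." " ") " "
      = some ((split1 [] (cadena.toList.map delimToSpace)).map String.ofList) := by
    simp [PySem.Str.split?, PySem.Chars.split?, hrepl, splitOnEq]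
  rw [hsplit]
  simp only [Option.getD_some, List.foldl_map, foldl_count]
  have hp : (fun cs : List Char => (String.ofList cs).toList.any (fun c => 'A' ≤ c && c ≤ 'Z'))
      = hasUp := by funext cs; simp [hasUp]
  rw [hp, split_countP cadena.toList []]
  simp [hasUp]
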